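-- pv_equiv track=rewrite | github.com/hwinkr/Algorithm | BaekJoon/22945 팀빌딩.py | solution
-- ===== SOURCE A (Python) =====
-- def solution(n: int, ability_list: list) -> int:
--     answer = 0
--     start, end = 0, n - 1
--
--     while start + 1 < end:  # s, e 사이에 최소 1명의 개발자가 있어야 한다.
--         answer = max(
--             answer, (end - start - 1) * min(ability_list[start], ability_list[end])
--         )
--
--         if ability_list[start] < ability_list[end]:
--             start += 1
--         else:
--             end -= 1
--
--     return answer
-- ===== SOURCE B (Python) =====
-- def solution(n: int, ability_list: list) -> int:
--     answer = 0
--     for i in range(n):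
--         for j in range(i + 2, n):
--             answer = max(answer, (j - i - 1) * min(ability_list[i], ability_list[j]))
--     return answer
-- ===== Notes on version B (the rewrite author's own statement) =====
-- stated objective: alternative
-- what changed: Replaces the converging two-pointer scan with an exhaustive double loop over all pairs (i, j) with j >= i+2, taking the max of (j-i-1)*min(a[i],a[j]); correctness rests on the proved fact that the two-pointer result equals the full pairwise maximum.
import Mathlib
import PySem

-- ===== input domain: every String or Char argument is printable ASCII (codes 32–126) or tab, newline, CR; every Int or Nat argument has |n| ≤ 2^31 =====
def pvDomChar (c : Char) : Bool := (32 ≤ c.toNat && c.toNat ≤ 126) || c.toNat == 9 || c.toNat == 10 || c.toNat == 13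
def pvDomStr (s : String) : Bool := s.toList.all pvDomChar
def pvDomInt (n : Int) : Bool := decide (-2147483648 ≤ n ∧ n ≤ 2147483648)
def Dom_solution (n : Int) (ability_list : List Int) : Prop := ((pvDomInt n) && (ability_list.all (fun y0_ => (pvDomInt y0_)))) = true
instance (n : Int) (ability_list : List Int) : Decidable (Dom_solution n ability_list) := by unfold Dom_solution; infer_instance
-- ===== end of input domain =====

-- B replaces the two-pointer scan with an exhaustive pairwise max (alternative algorithm, same return value).


-- ===== PORT A =====
-- ability_list[i]: exact under Pre_solution (every index A/B uses is then in range; Python raises outside)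
def pvGet (xs : List Int) (i : Int) : Int := (PySem.List.pyGet? xs i).getD 0

-- the while loop of A, state (start, end, answer)
def solLoop (xs : List Int) (s e ans : Int) : Int :=
  if h : s + 1 < e then
    let ans' := max ans ((e - s - 1) * min (pvGet xs s) (pvGet xs e))
    if pvGet xs s < pvGet xs e then solLoop xs (s + 1) e ans'
    else solLoop xs s (e - 1) ans'
  else ans
termination_by (e - s).toNat
decreasing_by all_goals omega

def solution (n : Int) (ability_list : List Int) : Int :=
  solLoop ability_list 0 (n - 1) 0

-- ===== PORT B =====
def solution_alt (n : Int) (ability_list : List Int) : Int :=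
  (PySem.List.pyRange 0 n 1).foldl (fun acc i =>
    (PySem.List.pyRange (i + 2) n 1).foldl (fun acc2 j =>
      max acc2 ((j - i - 1) * min (pvGet ability_list i) (pvGet ability_list j))) acc) 0

-- ===== PRECONDITION & SPEC =====
-- Pre_ excludes exactly the inputs where Python A raises IndexError: when the loop runs (n ≥ 3)
-- every accessed index lies in [0, n-1], so A returns normally iff n ≤ len(ability_list) or n < 3.
def Pre_solution (n : Int) (ability_list : List Int) : Prop :=
  3 ≤ n → n ≤ (ability_list.length : Int)
instance (n : Int) (ability_list : List Int) : Decidable (Pre_solution n ability_list) := by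
  unfold Pre_solution; infer_instance
def pvWitness_solution : Int × List Int := (4, [1, 3, 2, 4])

def Spec_solution (n : Int) (ability_list : List Int) (out : Int) : Prop := out = solution_alt n ability_list
instance (n : Int) (ability_list : List Int) (out : Int) : Decidable (Spec_solution n ability_list out) := by unfold Spec_solution; infer_instance

-- ===== CLAIM (what is proved, stated in full; the proofs are below) =====
def Claim_equal_solution : Prop := ∀ (n : Int) (ability_list : List Int), Dom_solution n ability_list → Pre_solution n ability_list → Spec_solution n ability_list (solution n ability_list)

-- ===== LEMMAS AND PROOFS =====

-- generic fold lemmas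
theorem foldl_ge_init {α : Type} (f : Int → α → Int) (hmono : ∀ a x, a ≤ f a x) :
    ∀ (l : List α) (acc : Int), acc ≤ l.foldl f acc := by
  intro l
  induction l with
  | nil => intro acc; simp
  | cons x t ih => intro acc; exact le_trans (hmono acc x) (ih (f acc x))

theorem foldl_ge_of_mem {α : Type} (f : Int → α → Int) (hmono : ∀ a x, a ≤ f a x)
    (v : Int) (x : α) (hv : ∀ a, v ≤ f a x) :
    ∀ (l : List α) (acc : Int), x ∈ l → v ≤ l.foldl f acc := by
  intro l
  induction l with
  | nil => intro acc h; simp at h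
  | cons y t ih =>
      intro acc h
      rcases List.mem_cons.mp h with h | h
      · subst h; exact le_trans (hv acc) (foldl_ge_init f hmono t (f acc x))
      · exact ih (f acc y) h

theorem foldl_le_of_step {α : Type} (f : Int → α → Int) (c : Int) :
    ∀ (l : List α) (acc : Int), acc ≤ c → (∀ a x, x ∈ l → a ≤ c → f a x ≤ c) →
    l.foldl f acc ≤ c := by
  intro l
  induction l with
  | nil => intro acc h _; simpa using h
  | cons y t ih =>
      intro acc h hs
      exact ih (f acc y) (hs acc y (List.mem_cons_self) h)
        (fun a x hx ha => hs a x (List.mem_cons_of_mem _ hx) ha)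

-- two-pointer lemmas
theorem solLoop_ge (xs : List Int) : ∀ (s e ans : Int), ans ≤ solLoop xs s e ans := by
  intro s e ans
  fun_induction solLoop with
  | case1 s e ans h a' hc ih => exact le_trans (le_max_left _ _) ih
  | case2 s e ans h a' _ ih => exact le_trans (le_max_left _ _) ih
  | case3 => exact le_refl _

theorem solLoop_le (xs : List Int) (c : Int) : ∀ (s e ans : Int), ans ≤ c →
    (∀ i j : Int, s ≤ i → i + 2 ≤ j → j ≤ e →
      (j - i - 1) * min (pvGet xs i) (pvGet xs j) ≤ c) →
    solLoop xs s e ans ≤ c := by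
  intro s e ans
  fun_induction solLoop with
  | case1 s e ans h a' hlt ih =>
      intro hans hp
      exact ih (max_le hans (hp s e le_rfl (by omega) le_rfl))
        (fun i j h1 h2 h3 => hp i j (by omega) h2 h3)
  | case2 s e ans h a' hlt ih =>
      intro hans hp
      exact ih (max_le hans (hp s e le_rfl (by omega) le_rfl))
        (fun i j h1 h2 h3 => hp i j h1 h2 (by omega))
  | case3 s e ans h =>
      intro hans _; exact hans

theorem solLoop_complete (xs : List Int) : ∀ (k : Nat) (s e ans i j : Int),
    (e - s).toNat ≤ k → 0 ≤ ans → s ≤ i → i + 2 ≤ j → j ≤ e →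
    (j - i - 1) * min (pvGet xs i) (pvGet xs j) ≤ solLoop xs s e ans := by
  intro k
  induction k with
  | zero => intro s e ans i j hk _ h1 h2 h3; omega
  | succ k ih =>
      intro s e ans i j hk h0 h1 h2 h3
      have hse : s + 1 < e := by omega
      rw [solLoop, dif_pos hse]
      set cand := (e - s - 1) * min (pvGet xs s) (pvGet xs e) with hcand
      have h0' : (0:Int) ≤ max ans cand := le_trans h0 (le_max_left _ _)
      by_cases hb : pvGet xs s < pvGet xs e
      · rw [if_pos hb]
        by_cases hi : s + 1 ≤ i
        · exact ih (s+1) e (max ans cand) i j (by omega) h0' hi h2 h3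
        · -- i = s : the pair (s, j) is dominated by cand (or is ≤ 0 ≤ answer)
          have hieq : i = s := by omega
          subst hieq
          have hge := solLoop_ge xs (i+1) e (max ans cand)
          set m := min (pvGet xs i) (pvGet xs j) with hm
          by_cases hmpos : 0 < m
          · have hMm : m ≤ min (pvGet xs i) (pvGet xs e) := by
              have : m ≤ pvGet xs i := min_le_left _ _
              omega
            have hcb : (j - i - 1) * m ≤ cand := by
              rw [hcand]
              have h4 : (0:Int) ≤ j - i - 1 := by omega
              have h5 : j - i - 1 ≤ e - i - 1 := by omega
              nlinarith
            exact le_trans (le_trans hcb (le_trans (le_max_right ans cand) hge)) le_rfl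
          · have : (j - i - 1) * m ≤ 0 :=
              mul_nonpos_of_nonneg_of_nonpos (by omega) (by omega)
            exact le_trans this (le_trans h0' hge)
      · rw [if_neg hb]
        by_cases hj : j ≤ e - 1
        · exact ih s (e-1) (max ans cand) i j (by omega) h0' h1 h2 hj
        · -- j = e : the pair (i, e) is dominated by cand (or is ≤ 0 ≤ answer)
          have hjeq : j = e := by omega
          subst hjeq
          have hge := solLoop_ge xs s (j-1) (max ans cand)
          set m := min (pvGet xs i) (pvGet xs j) with hm
          by_cases hmpos : 0 < m
          · have hMm : m ≤ min (pvGet xs s) (pvGet xs j) := by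
              have : m ≤ pvGet xs j := min_le_right _ _
              omega
            have hcb : (j - i - 1) * m ≤ cand := by
              rw [hcand]
              have h4 : (0:Int) ≤ j - i - 1 := by omega
              have h5 : j - i - 1 ≤ j - s - 1 := by omega
              nlinarith
            exact le_trans hcb (le_trans (le_max_right ans cand) hge)
          · have : (j - i - 1) * m ≤ 0 :=
              mul_nonpos_of_nonneg_of_nonpos (by omega) (by omega)
            exact le_trans this (le_trans h0' hge)

theorem alt_inner_mono (xs : List Int) (i : Int) :
    ∀ (a : Int) (x : Int), a ≤ max a ((x - i - 1) * min (pvGet xs i) (pvGet xs x)) :=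
  fun _ _ => le_max_left _ _

theorem solution_eq_alt (n : Int) (xs : List Int) : solution n xs = solution_alt n xs := by
  have hmonoO : ∀ (a : Int) (i : Int), a ≤ (PySem.List.pyRange (i + 2) n 1).foldl
      (fun acc2 j => max acc2 ((j - i - 1) * min (pvGet xs i) (pvGet xs j))) a :=
    fun a i => foldl_ge_init _ (alt_inner_mono xs i) _ a
  apply le_antisymm
  · -- two-pointer ≤ brute force
    apply solLoop_le xs (solution_alt n xs) 0 (n-1) 0
    · exact foldl_ge_init _ hmonoO _ 0
    · intro i j h1 h2 h3
      apply foldl_ge_of_mem _ hmonoO _ i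
      · intro a
        apply foldl_ge_of_mem _ (alt_inner_mono xs i) _ j
        · intro a2; exact le_max_right _ _
        · exact (PySem.List.mem_pyRange_one).mpr ⟨h2, by omega⟩
      · exact (PySem.List.mem_pyRange_one).mpr ⟨h1, by omega⟩
  · -- brute force ≤ two-pointer
    apply foldl_le_of_step _ _ _ _ (solLoop_ge xs 0 (n-1) 0)
    intro a i hi ha
    apply foldl_le_of_step _ _ _ _ ha
    intro a2 j hj ha2
    have hi' := (PySem.List.mem_pyRange_one).mp hi
    have hj' := (PySem.List.mem_pyRange_one).mp hj
    exact max_le ha2 (solLoop_complete xs (n - 0).toNat 0 (n-1) 0 i j (by omega) le_rfl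
      (by omega) (by omega) (by omega))

-- ===== VERDICT (by name: the statement is the Claim_ definition above) =====
theorem solution_spec : Claim_equal_solution := by
  intro n xs _ _
  unfold Spec_solution
  exact solution_eq_alt n xs
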